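-- pv_equiv track=rewrite | github.com/MinMolang/codePractice | algospot/RATIO.py | neededGames
-- ===== SOURCE A (Python) =====
-- MAX_NUM = 2000000000
--
-- def ratio(games, won):
--     return won * 100 // games #꼭 //로 나눠주기
--
-- def neededGames(games, won):
--
--     # 2, 000, 000, 000 연승해도 승률이 오를 수 없는 경우
--     if ratio(games, won) == ratio (games + MAX_NUM, won + MAX_NUM):
--         return -1
--
--     lo, hi = 0 , MAX_NUM
--
--     # 반복문 불변식
--     # 1. lo게임 이기면 승률은 변하지 않는다.
--     # 2. hi게임 이기면 승률은 변한다.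
--
--     while(lo + 1 < hi):
--         mid = (lo + hi) // 2 # 꼭 //2로 나눠주기
--         if ratio(games, won) == ratio(games + mid, won + mid):
--             lo = mid
--         else:
--             hi = mid
--
--     return hi
-- ===== SOURCE B (Python) =====
-- MAX_NUM = 2000000000
--
-- def neededGames(games, won):
--     r = won * 100 // games
--     # ratio can never change even after MAX_NUM straight wins
--     if r == (won + MAX_NUM) * 100 // (games + MAX_NUM):
--         return -1
--     if won < games:
--         # ratio rises: smallest g with (won+g)*100 >= (r+1)*(games+g)
--         num = (r + 1) * games - won * 100
--         return -(-num // (99 - r))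
--     # won > games: ratio falls: smallest g with (won+g)*100 < r*(games+g)
--     return (won * 100 - r * games) // (r - 100) + 1
-- ===== Notes on version B (the rewrite author's own statement) =====
-- stated objective: simpler
-- what changed: Replaces A's 31-iteration binary search over [0, 2e9] with a loop-free closed-form ceiling-division solution of the linear inequality that characterises the first change of the floored ratio.
-- outside the precondition, e.g. on neededGames(-1, -1): A returns -1, B returns -1; on neededGames(-1, 3): A raises ZeroDivisionError, B returns 1
import Mathlib
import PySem

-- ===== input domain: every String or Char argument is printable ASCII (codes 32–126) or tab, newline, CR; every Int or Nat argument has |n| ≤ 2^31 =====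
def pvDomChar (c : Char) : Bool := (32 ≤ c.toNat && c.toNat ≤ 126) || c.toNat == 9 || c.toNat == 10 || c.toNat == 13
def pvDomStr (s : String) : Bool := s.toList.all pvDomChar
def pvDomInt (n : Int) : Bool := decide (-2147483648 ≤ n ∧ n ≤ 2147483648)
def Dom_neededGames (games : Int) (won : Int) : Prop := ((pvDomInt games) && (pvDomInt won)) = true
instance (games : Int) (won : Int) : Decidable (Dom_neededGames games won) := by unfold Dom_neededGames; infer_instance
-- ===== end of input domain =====

-- B replaces A's 31-step binary search over [0, 2·10^9] with a closed-form
-- ceiling-division solution of the linear inequality characterising the first ratio change.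

-- ===== PORT A =====
-- def ratio(games, won): return won * 100 // games
def pvRatio (games : Int) (won : Int) : Int :=
  PySem.Int.floordiv (won * 100) games

-- midpoint is strictly between lo and hi when lo + 1 < hi (used for termination)
theorem pvMid_bounds (lo hi : Int) (h : lo + 1 < hi) :
    lo + 1 ≤ PySem.Int.floordiv (lo + hi) 2 ∧ PySem.Int.floordiv (lo + hi) 2 < hi :=
  ⟨(PySem.Int.le_floordiv_iff_mul_le (by omega)).mpr (by omega),
   (PySem.Int.floordiv_lt_iff_lt_mul (by omega)).mpr (by omega)⟩

-- the while-loop of A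
def pvLoop (games won lo hi : Int) : Int :=
  if h : lo + 1 < hi then
    if pvRatio games won = pvRatio (games + PySem.Int.floordiv (lo + hi) 2)
                                   (won + PySem.Int.floordiv (lo + hi) 2) then
      pvLoop games won (PySem.Int.floordiv (lo + hi) 2) hi
    else
      pvLoop games won lo (PySem.Int.floordiv (lo + hi) 2)
  else hi
termination_by (hi - lo).toNat
decreasing_by
  · have := pvMid_bounds lo hi h; omega
  · have := pvMid_bounds lo hi h; omega

def neededGames (games : Int) (won : Int) : Int :=
  if pvRatio games won = pvRatio (games + 2000000000) (won + 2000000000) then -1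
  else pvLoop games won 0 2000000000

-- ===== PORT B =====
def neededGames_alt (games : Int) (won : Int) : Int :=
  let r := PySem.Int.floordiv (won * 100) games
  if r = PySem.Int.floordiv ((won + 2000000000) * 100) (games + 2000000000) then -1
  else if won < games then
    (let num := (r + 1) * games - won * 100;
     -(PySem.Int.floordiv (-num) (99 - r)))
  else
    PySem.Int.floordiv (won * 100 - r * games) (r - 100) + 1

-- ===== PRECONDITION & SPEC =====
-- Pre_ excludes games ≤ 0 (not a valid game count): games = 0 always raises, and for
-- games < 0 A raises ZeroDivisionError whenever its binary search happens to probe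
-- mid = -games — a path-dependent set with no closed form, so the nonpositive side
-- cannot be split into a closed-form returning region (where A does return there,
-- B was observed to agree, but that agreement is not claimed or proved).
def Pre_neededGames (games : Int) (won : Int) : Prop := 1 ≤ games
instance (games : Int) (won : Int) : Decidable (Pre_neededGames games won) := by
  unfold Pre_neededGames; infer_instance
def pvWitness_neededGames : Int × Int := (10, 8)

def Spec_neededGames (games : Int) (won : Int) (out : Int) : Prop := out = neededGames_alt games won
instance (games : Int) (won : Int) (out : Int) : Decidable (Spec_neededGames games won out) := by
  unfold Spec_neededGames; infer_instance

-- ===== CLAIM (what is proved, stated in full; the proofs are below) =====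
def Claim_equal_neededGames : Prop := ∀ (games : Int) (won : Int), Dom_neededGames games won → Pre_neededGames games won → Spec_neededGames games won (neededGames games won)

-- ===== LEMMAS AND PROOFS =====

-- floor bracket for the starting ratio r
theorem pvRatio_bracket (games won : Int) (hg : 0 < games) :
    pvRatio games won * games ≤ won * 100 ∧ won * 100 < (pvRatio games won + 1) * games :=
  (PySem.Int.floordiv_eq_iff_of_pos hg).mp rfl

-- if won = games the ratio is 100 forever, so the guard fires
theorem pvRatio_self (x : Int) (hx : 0 < x) : pvRatio x x = 100 := by
  rw [pvRatio, PySem.Int.floordiv_eq_iff_of_pos hx]; constructor <;> nlinarith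

-- B unfolded (the lets are definitional)
theorem pvAlt_eq (games won : Int) :
    neededGames_alt games won =
      if pvRatio games won = pvRatio (games + 2000000000) (won + 2000000000) then -1
      else if won < games then
        -(PySem.Int.floordiv (-((pvRatio games won + 1) * games - won * 100))
            (99 - pvRatio games won))
      else
        PySem.Int.floordiv (won * 100 - pvRatio games won * games)
          (pvRatio games won - 100) + 1 := rfl

-- characterisation: under the guard being false, B's value G is the least g ≥ 0
-- at which the floored ratio changes, with 1 ≤ G ≤ 2·10^9
theorem pvChar (games won : Int) (hg : 1 ≤ games)
    (hgrd : pvRatio games won ≠ pvRatio (games + 2000000000) (won + 2000000000)) :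
    1 ≤ neededGames_alt games won ∧ neededGames_alt games won ≤ 2000000000 ∧
      ∀ g, 0 ≤ g →
        (pvRatio games won = pvRatio (games + g) (won + g) ↔ g < neededGames_alt games won) := by
  have hg0 : (0:Int) < games := by omega
  obtain ⟨hb1, hb2⟩ := pvRatio_bracket games won hg0
  rw [pvAlt_eq, if_neg hgrd]
  set r := pvRatio games won with hr
  rcases lt_trichotomy won games with hlt | heq | hgt
  · -- won < games : the floored ratio is nondecreasing in g
    rw [if_pos hlt]
    have hr99 : r ≤ 99 := by nlinarith
    have hchg : ∀ g : Int, 0 ≤ g →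
        (r = pvRatio (games + g) (won + g) ↔ (won + g) * 100 < (r + 1) * (games + g)) := by
      intro g hgge
      have hpos : (0:Int) < games + g := by omega
      constructor
      · intro he
        exact ((PySem.Int.floordiv_eq_iff_of_pos hpos).mp he.symm).2
      · intro h2
        exact ((PySem.Int.floordiv_eq_iff_of_pos hpos).mpr ⟨by nlinarith, h2⟩).symm
    have h99 : r ≠ 99 := by
      intro h99
      exact hgrd ((hchg 2000000000 (by omega)).mpr (by nlinarith))
    have hden : (0:Int) < 99 - r := by omega
    obtain ⟨hG1, hG2⟩ :=
      (PySem.Int.neg_floordiv_neg_eq_iff_of_pos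
        (a := (r + 1) * games - won * 100) hden).mp rfl
    set G := -(PySem.Int.floordiv (-((r + 1) * games - won * 100)) (99 - r)) with hGdef
    have hcharG : ∀ g : Int, 0 ≤ g → (r = pvRatio (games + g) (won + g) ↔ g < G) := by
      intro g hgge
      rw [hchg g hgge]
      constructor
      · intro h; nlinarith
      · intro h
        have : g ≤ G - 1 := by omega
        nlinarith
    refine ⟨?_, ?_, hcharG⟩
    · by_contra hc
      have : G ≤ 0 := by omega
      nlinarith
    · have := hcharG 2000000000 (by omega)
      by_contra hc
      exact hgrd (this.mpr (by omega))
  · -- won = games : the ratio is 100 forever, so the guard must have fired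
    exfalso
    apply hgrd
    rw [hr, heq, pvRatio_self games hg0, pvRatio_self _ (by omega)]
  · -- games < won : the floored ratio is nonincreasing in g
    rw [if_neg (not_lt.mpr (le_of_lt hgt))]
    have hr100 : 100 ≤ r := by nlinarith
    have hchg : ∀ g : Int, 0 ≤ g →
        (r = pvRatio (games + g) (won + g) ↔ r * (games + g) ≤ (won + g) * 100) := by
      intro g hgge
      have hpos : (0:Int) < games + g := by omega
      constructor
      · intro he
        exact ((PySem.Int.floordiv_eq_iff_of_pos hpos).mp he.symm).1
      · intro h1
        exact ((PySem.Int.floordiv_eq_iff_of_pos hpos).mpr ⟨h1, by nlinarith⟩).symm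
    have h100 : r ≠ 100 := by
      intro h100
      exact hgrd ((hchg 2000000000 (by omega)).mpr (by nlinarith))
    have hd : (0:Int) < r - 100 := by omega
    obtain ⟨hf1, hf2⟩ :=
      (PySem.Int.floordiv_eq_iff_of_pos (a := won * 100 - r * games) hd).mp rfl
    set F := PySem.Int.floordiv (won * 100 - r * games) (r - 100) with hFdef
    have hF0 : 0 ≤ F :=
      (PySem.Int.le_floordiv_iff_mul_le hd).mpr (by nlinarith)
    have hcharG : ∀ g : Int, 0 ≤ g → (r = pvRatio (games + g) (won + g) ↔ g < F + 1) := by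
      intro g hgge
      rw [hchg g hgge]
      constructor
      · intro h; nlinarith
      · intro h
        have : g ≤ F := by omega
        nlinarith
    refine ⟨by omega, ?_, hcharG⟩
    have := hcharG 2000000000 (by omega)
    by_contra hc
    exact hgrd (this.mpr (by omega))

-- the binary search returns G whenever 0 ≤ lo < G ≤ hi and G is the threshold
theorem pvLoop_eq (games won G : Int)
    (hchar : ∀ g, 0 ≤ g →
      (pvRatio games won = pvRatio (games + g) (won + g) ↔ g < G)) :
    ∀ n (lo hi : Int), (hi - lo).toNat ≤ n → 0 ≤ lo → lo < G → G ≤ hi →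
      pvLoop games won lo hi = G := by
  intro n
  induction n with
  | zero => intro lo hi hn h0 h1 h2; omega
  | succ n ih =>
    intro lo hi hn h0 h1 h2
    rw [pvLoop]
    split
    · next h =>
      have hmid := pvMid_bounds lo hi h
      split
      · next heq =>
        have hlt : PySem.Int.floordiv (lo + hi) 2 < G :=
          (hchar _ (by omega)).mp heq
        exact ih _ _ (by omega) (by omega) hlt h2
      · next hne =>
        have hge : G ≤ PySem.Int.floordiv (lo + hi) 2 := by
          by_contra hc
          exact hne ((hchar _ (by omega)).mpr (by omega))
        exact ih _ _ (by omega) h0 h1 hge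
    · next h => omega

-- ===== VERDICT (by name: the statement is the Claim_ definition above) =====
theorem neededGames_spec : Claim_equal_neededGames := by
  intro games won _ hpre
  unfold Spec_neededGames neededGames
  by_cases hgrd : pvRatio games won = pvRatio (games + 2000000000) (won + 2000000000)
  · rw [if_pos hgrd]
    rw [pvAlt_eq, if_pos hgrd]
  · rw [if_neg hgrd]
    obtain ⟨h1, h2, hchar⟩ := pvChar games won hpre hgrd
    exact pvLoop_eq games won _ hchar 2000000000 0 2000000000 (by omega) (by omega) h1 h2
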